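-- pv_equiv track=rewrite | github.com/pabloacostaflores/cryptography | vigenereCipher/freq_analysis.py | eng_freq_match_score
-- ===== SOURCE A (Python) =====
-- import string
--
-- ETAOIN = 'ETAOINSHRDLCUMWFGYPBVKJXQZ'
--
-- LETTERS = string.ascii_letters.upper()
--
-- def get_letter_count(message):
--     letter_count = {'A': 0, 'B': 0, 'C': 0, 'D': 0, 'E': 0, 'F': 0, 'G': 0, 'H': 0, 'I': 0, 'J': 0, 'K': 0, 'L': 0, 'M': 0, 'N': 0, 'O': 0, 'P': 0, 'Q': 0, 'R': 0, 'S': 0, 'T': 0, 'U': 0, 'V': 0, 'W': 0, 'X': 0, 'Y': 0, 'Z': 0}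
--     for letter in message.upper():
--         if letter in LETTERS:
--             letter_count[letter] += 1
--     return letter_count
--
-- def get_item_zero(x):
--     return x[0]
--
-- def get_freq_order(message):
--     letter_2_freq = get_letter_count(message)
--     freq_2_letter = {}
--     for letter in LETTERS:
--         if letter_2_freq[letter.upper()] not in freq_2_letter:
--             freq_2_letter[letter_2_freq[letter.upper()]] = [letter.upper()]
--         else:
--              freq_2_letter[letter_2_freq[letter.upper()]].append(letter.upper())
--
--     for freq in freq_2_letter:
--         freq_2_letter[freq].sort(key=ETAOIN.find, reverse=True)
--         freq_2_letter[freq] = ''.join(freq_2_letter[freq])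
--
--
--     freq_pairs = list(freq_2_letter.items())
--
--     freq_pairs.sort(key=get_item_zero, reverse=True)
--
--     freq_order = []
--
--     for freq_pair in freq_pairs:
--         freq_order.append(freq_pair[1])
--
--     return ''.join(freq_order)
--
-- def eng_freq_match_score(message):
--     freq_order = get_freq_order(message)
--     match_score = 0
--     for common_letter in ETAOIN[:6]:
--         if common_letter in freq_order[:6]:
--             match_score += 1
--     for uncommon_letter in ETAOIN[-6:]:
--         if uncommon_letter in freq_order[-6:]:
--             match_score += 1
--
--     return match_score
-- ===== SOURCE B (Python) =====
-- import string
--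
-- ETAOIN = 'ETAOINSHRDLCUMWFGYPBVKJXQZ'
--
-- LETTERS = string.ascii_letters.upper()
--
-- def eng_freq_match_score(message):
--     # One composite-key stable sort replaces the count-dict -> bucket-dict ->
--     # per-bucket sort -> bucket sort -> concatenate pipeline.  Since
--     # ETAOIN.find(L) is in [0, 26) for every letter, count*26 + find orders
--     # exactly like the tuple (count, find); sorting the 52-char LETTERS keeps
--     # every letter appearing twice, as in the original.
--     ups = list(message.upper())
--     freq_order = ''.join(sorted(LETTERS,
--                                 key=lambda L: ups.count(L) * 26 + ETAOIN.find(L),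
--                                 reverse=True))
--     return (sum(c in freq_order[:6] for c in ETAOIN[:6])
--             + sum(c in freq_order[-6:] for c in ETAOIN[-6:]))
-- ===== Notes on version B (the rewrite author's own statement) =====
-- stated objective: simpler
-- what changed: A's pipeline (letter-count dict, then a freq->letters bucket dict, a per-bucket sort by ETAOIN.find, a sort of the buckets by frequency, and concatenation) is replaced by a single stable sort of the same 52-char LETTERS under the composite key count*26 + ETAOIN.find (find is in [0,26), so this orders exactly like (count, find) descending), followed by the same first-6/last-6 scoring written as two sums of booleans.
import Mathlib
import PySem

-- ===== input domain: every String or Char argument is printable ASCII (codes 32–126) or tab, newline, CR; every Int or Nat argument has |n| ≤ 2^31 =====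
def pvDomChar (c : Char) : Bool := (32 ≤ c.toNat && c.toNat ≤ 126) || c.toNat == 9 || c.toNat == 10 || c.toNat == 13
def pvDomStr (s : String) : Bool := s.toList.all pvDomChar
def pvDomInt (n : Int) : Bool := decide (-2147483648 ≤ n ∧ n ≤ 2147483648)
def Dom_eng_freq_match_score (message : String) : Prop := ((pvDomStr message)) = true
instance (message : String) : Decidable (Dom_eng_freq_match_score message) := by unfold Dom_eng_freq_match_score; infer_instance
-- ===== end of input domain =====

-- B replaces A's count-dict → bucket-dict → per-bucket sort → bucket sort → concatenate
-- pipeline by ONE stable sort of the 52-char LETTERS under the composite key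
-- count*26 + ETAOIN.find; objective: simpler (same return value; no observable side effects involved).

-- ===== PORT A =====

-- ETAOIN = 'ETAOINSHRDLCUMWFGYPBVKJXQZ' (strings are carried as their code-point lists)
def ETAOIN : List Char := "ETAOINSHRDLCUMWFGYPBVKJXQZ".toList

-- LETTERS = string.ascii_letters.upper(), i.e. A..Z twice
def LETTERS : List Char := "ABCDEFGHIJKLMNOPQRSTUVWXYZABCDEFGHIJKLMNOPQRSTUVWXYZ".toList

def get_letter_count (message : String) : PySem.Dict Char Int :=
  let letter_count : PySem.Dict Char Int := PySem.Dict.ofList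
    [('A',0),('B',0),('C',0),('D',0),('E',0),('F',0),('G',0),('H',0),('I',0),('J',0),('K',0),('L',0),('M',0),
     ('N',0),('O',0),('P',0),('Q',0),('R',0),('S',0),('T',0),('U',0),('V',0),('W',0),('X',0),('Y',0),('Z',0)]
  -- 'letter in LETTERS' on a one-char string is list membership (exact);
  -- 'letter_count[letter] += 1' on a key the guard proves present is modify letter 0 (·+1) (exact)
  (PySem.Str.upper message).toList.foldl
    (fun d letter => if LETTERS.contains letter then d.modify letter 0 (· + 1) else d)
    letter_count

def get_item_zero (x : Int × List Char) : Int := x.1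

def get_freq_order (message : String) : List Char :=
  let letter_2_freq := get_letter_count message
  -- 'letter_2_freq[letter.upper()]' never raises (every key of LETTERS is present): getD _ 0 (exact here)
  let freq_2_letter : PySem.Dict Int (List Char) :=
    LETTERS.foldl
      (fun d letter =>
        if !(d.contains (letter_2_freq.getD (PySem.Chars.upperChar letter) 0)) then
          d.insert (letter_2_freq.getD (PySem.Chars.upperChar letter) 0) [PySem.Chars.upperChar letter]
        else
          d.insert (letter_2_freq.getD (PySem.Chars.upperChar letter) 0)
            (d.getD (letter_2_freq.getD (PySem.Chars.upperChar letter) 0) [] ++ [PySem.Chars.upperChar letter]))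
      PySem.Dict.empty
  -- 'for freq in freq_2_letter: freq_2_letter[freq].sort(key=ETAOIN.find, reverse=True);
  --  freq_2_letter[freq] = ''.join(...)' reassigns every existing key in place: map over the items
  -- (insert on a present key overwrites in place, so this is exact); joined strings stay char lists
  let freq_pairs :=
    freq_2_letter.items.map (fun p => (p.1, PySem.List.sorted p.2 (fun c => PySem.Chars.find ETAOIN [c]) true))
  let freq_pairs := PySem.List.sorted freq_pairs get_item_zero true
  -- freq_order = [] ; for freq_pair in freq_pairs: freq_order.append(freq_pair[1]) ; ''.join(freq_order)
  (freq_pairs.map (fun p => p.2)).flatten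

def eng_freq_match_score (message : String) : Int :=
  let freq_order := get_freq_order message
  let match_score : Int := 0
  -- 'common_letter in freq_order[:6]' on one-char strings is list membership (exact)
  let match_score := (PySem.List.slice ETAOIN none (some 6)).foldl
    (fun s c => if (PySem.List.slice freq_order none (some 6)).contains c then s + 1 else s) match_score
  (PySem.List.slice ETAOIN (some (-6)) none).foldl
    (fun s c => if (PySem.List.slice freq_order (some (-6)) none).contains c then s + 1 else s) match_score

-- ===== PORT B =====

-- Source B's sort key: ups.count(L) * 26 + ETAOIN.find(L)
def bkey (ups : List Char) (L : Char) : Int := (ups.count L : Int) * 26 + PySem.Chars.find ETAOIN [L]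

def eng_freq_match_score_alt (message : String) : Int :=
  let ups := (PySem.Str.upper message).toList
  let freq_order := PySem.List.sorted LETTERS (bkey ups) true
  -- 'c in freq_order[:6]' on one-char strings is list membership (exact); a sum of booleans is countP
  ((PySem.List.slice ETAOIN none (some 6)).countP
      (fun c => (PySem.List.slice freq_order none (some 6)).contains c) : Int)
  + ((PySem.List.slice ETAOIN (some (-6)) none).countP
      (fun c => (PySem.List.slice freq_order (some (-6)) none).contains c) : Int)

-- ===== PRECONDITION & SPEC =====
def Spec_eng_freq_match_score (message : String) (out : Int) : Prop := out = eng_freq_match_score_alt message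
instance (message : String) (out : Int) : Decidable (Spec_eng_freq_match_score message out) := by unfold Spec_eng_freq_match_score; infer_instance

-- ===== CLAIM (what is proved, stated in full; the proofs are below) =====
def Claim_equal_eng_freq_match_score : Prop := ∀ (message : String), Dom_eng_freq_match_score message → Spec_eng_freq_match_score message (eng_freq_match_score message)

-- ===== LEMMAS AND PROOFS =====

theorem pv_LETTERS_eq : LETTERS =
    ['A','B','C','D','E','F','G','H','I','J','K','L','M','N','O','P','Q','R','S','T','U','V','W','X','Y','Z',
     'A','B','C','D','E','F','G','H','I','J','K','L','M','N','O','P','Q','R','S','T','U','V','W','X','Y','Z'] := rfl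

-- facts about the two literal alphabets
set_option maxRecDepth 4000 in
theorem pv_upperChar_id : ∀ L ∈ LETTERS, PySem.Chars.upperChar L = L := by
  intro L hL; rw [pv_LETTERS_eq] at hL; fin_cases hL <;> decide

set_option maxRecDepth 4000 in
theorem pv_find_bounds : ∀ L ∈ LETTERS,
    0 ≤ PySem.Chars.find ETAOIN [L] ∧ PySem.Chars.find ETAOIN [L] ≤ 25 := by
  intro L hL; rw [pv_LETTERS_eq] at hL; fin_cases hL <;> decide

set_option maxRecDepth 4000 in
theorem pv_find_get : ∀ L ∈ LETTERS,
    ETAOIN[(PySem.Chars.find ETAOIN [L]).toNat]? = some L := by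
  intro L hL; rw [pv_LETTERS_eq] at hL; fin_cases hL <;> decide

theorem pv_find_inj : ∀ a ∈ LETTERS, ∀ b ∈ LETTERS,
    PySem.Chars.find ETAOIN [a] = PySem.Chars.find ETAOIN [b] → a = b := by
  intro a ha b hb h
  have h1 := pv_find_get a ha
  have h2 := pv_find_get b hb
  rw [h, h2] at h1
  exact (Option.some.inj h1).symm

set_option maxRecDepth 4000 in
theorem pv_init_getD : ∀ L ∈ LETTERS,
    (PySem.Dict.ofList
      [('A',(0:Int)),('B',0),('C',0),('D',0),('E',0),('F',0),('G',0),('H',0),('I',0),('J',0),('K',0),('L',0),('M',0),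
       ('N',0),('O',0),('P',0),('Q',0),('R',0),('S',0),('T',0),('U',0),('V',0),('W',0),('X',0),('Y',0),('Z',0)]).getD L 0 = 0 := by
  intro L hL; rw [pv_LETTERS_eq] at hL; fin_cases hL <;> decide

-- the guarded counting loop is the unguarded loop over the filtered list
theorem pv_guard_filter (l : List Char) (d : PySem.Dict Char Int) :
    l.foldl (fun d letter => if LETTERS.contains letter then d.modify letter 0 (· + 1) else d) d
      = (l.filter (fun c => LETTERS.contains c)).foldl (fun d letter => d.modify letter 0 (· + 1)) d := by
  induction l generalizing d with
  | nil => rfl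
  | cons a t ih =>
    simp only [List.foldl_cons, List.filter_cons]
    by_cases h : LETTERS.contains a
    · rw [if_pos h, if_pos h, List.foldl_cons, ih]
    · rw [if_neg h, if_neg h, ih]

-- A's letter_count agrees with ups.count on every letter
theorem pv_lc_getD (m : String) : ∀ L ∈ LETTERS,
    (get_letter_count m).getD L 0 = ((PySem.Str.upper m).toList.count L : Int) := by
  intro L hL
  unfold get_letter_count
  rw [pv_guard_filter, PySem.Dict.getD_foldl_modify_add_one, pv_init_getD L hL,
      List.count_filter (by simpa using hL)]
  simp

-- A's dict-building step is modify
theorem pv_step_modify (d : PySem.Dict Int (List Char)) (f : Int) (L : Char) :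
    (if !(d.contains f) then d.insert f [L] else d.insert f (d.getD f [] ++ [L]))
      = d.modify f [] (fun x => x ++ [L]) := by
  unfold PySem.Dict.modify
  by_cases h : d.contains f
  · simp [h]
  · rw [PySem.Dict.getD_of_not_contains d [] (by simpa using h)]
    simp [h]

theorem pv_bucket_fold (lc : PySem.Dict Char Int) :
    LETTERS.foldl
      (fun d letter =>
        if !(d.contains (lc.getD (PySem.Chars.upperChar letter) 0)) then
          d.insert (lc.getD (PySem.Chars.upperChar letter) 0) [PySem.Chars.upperChar letter]
        else
          d.insert (lc.getD (PySem.Chars.upperChar letter) 0)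
            (d.getD (lc.getD (PySem.Chars.upperChar letter) 0) [] ++ [PySem.Chars.upperChar letter]))
      PySem.Dict.empty
    = LETTERS.foldl (fun d L => d.modify (lc.getD L 0) [] (fun x => x ++ [L])) PySem.Dict.empty := by
  apply PySem.List.foldl_congr_mem'
  intro L hL d
  rw [pv_upperChar_id L hL]
  exact pv_step_modify d (lc.getD L 0) L

-- filtering the (key, x) pairs and projecting is filtering by the key
theorem pv_fiber_map (g : Char → Int) (xs : List Char) (c : Int) :
    ((xs.map (fun x => (g x, x))).filter (fun p => p.1 == c)).map (fun p => p.2)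
      = xs.filter (fun x => g x == c) := by
  induction xs with
  | nil => rfl
  | cons a t ih => by_cases h : g a == c <;> simp [h] <;> exact ih

-- summing an indicator over a list
theorem pv_sum_count (K : List Int) (v : Int) (N : Nat) :
    (K.map (fun f => if v = f then N else 0)).sum = K.count v * N := by
  induction K with
  | nil => simp
  | cons a t ih =>
    by_cases h : v = a
    · subst h
      simp [ih]
      ring
    · simp [List.count_cons, h, beq_eq_false_iff_ne.2 (Ne.symm h), ih]

-- the composite key is antisymmetric on letters
theorem pv_bkey_anti (ups : List Char) : ∀ a ∈ LETTERS, ∀ b ∈ LETTERS,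
    bkey ups b ≤ bkey ups a → bkey ups a ≤ bkey ups b → a = b := by
  intro a ha b hb h1 h2
  have hab : bkey ups a = bkey ups b := le_antisymm h2 h1
  have fa := pv_find_bounds a ha
  have fb := pv_find_bounds b hb
  apply pv_find_inj a ha b hb
  unfold bkey at hab
  omega

-- the heart of the equivalence: A's grouped-and-sorted concatenation IS the composite-key sort
theorem pv_concat_eq (ups : List Char) (ck : Char → Int)
    (hck : ∀ L ∈ LETTERS, ck L = (ups.count L : Int)) :
    ((PySem.List.sorted
        ((PySem.Set.ofList (LETTERS.map ck)).map
          (fun f => (f, PySem.List.sorted (LETTERS.filter (fun L => ck L == f))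
                        (fun c => PySem.Chars.find ETAOIN [c]) true)))
        get_item_zero true).map (fun p => p.2)).flatten
      = PySem.List.sorted LETTERS (bkey ups) true := by
  set K := PySem.Set.ofList (LETTERS.map ck) with hK
  set items2 := K.map (fun f => (f, PySem.List.sorted (LETTERS.filter (fun L => ck L == f))
      (fun c => PySem.Chars.find ETAOIN [c]) true)) with hitems2
  set FP := PySem.List.sorted items2 get_item_zero true with hFP
  have hFPmem : ∀ p ∈ FP, ∃ f, p = (f, PySem.List.sorted (LETTERS.filter (fun L => ck L == f))
      (fun c => PySem.Chars.find ETAOIN [c]) true) := by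
    intro p hp
    have hp2 : p ∈ items2 := (PySem.List.sorted_perm items2 get_item_zero true).subset hp
    obtain ⟨f, _, rfl⟩ := List.mem_map.1 hp2
    exact ⟨f, rfl⟩
  have hbmem : ∀ f : Int, ∀ x ∈ PySem.List.sorted (LETTERS.filter (fun L => ck L == f))
      (fun c => PySem.Chars.find ETAOIN [c]) true, x ∈ LETTERS ∧ ck x = f := by
    intro f x hx
    have h1 := (PySem.List.mem_sorted _ _ _ _).1 hx
    have h2 := List.mem_filter.1 h1
    exact ⟨h2.1, by simpa using h2.2⟩
  -- the concatenation is a permutation of LETTERS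
  have hcount : ∀ c, ((FP.map (fun p => p.2)).flatten).count c = LETTERS.count c := by
    intro c
    rw [List.count_flatten]
    have hperm1 : ((FP.map (fun p => p.2)).map (List.count c)).Perm
        ((items2.map (fun p => p.2)).map (List.count c)) :=
      (((PySem.List.sorted_perm items2 get_item_zero true).map _).map _)
    rw [hperm1.sum_eq, hitems2]
    simp only [List.map_map, Function.comp_def]
    rw [List.map_congr_left (g := fun f => if ck c = f then LETTERS.count c else 0) ?_]
    · rw [pv_sum_count]
      by_cases hc : ck c ∈ K
      · rw [List.count_eq_one_of_mem (PySem.Set.nodup_ofList _) hc, one_mul]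
      · have hcL : c ∉ LETTERS := fun hmem => hc (by
          rw [hK, PySem.Set.mem_ofList]
          exact List.mem_map.2 ⟨c, hmem, rfl⟩)
        rw [List.count_eq_zero_of_not_mem hc, zero_mul,
            List.count_eq_zero_of_not_mem hcL]
    · intro f _
      dsimp only
      rw [(PySem.List.sorted_perm _ _ _).count_eq]
      by_cases h : ck c = f
      · rw [if_pos h, List.count_filter (by simp [h])]
      · rw [if_neg h, List.count_eq_zero]
        intro hmem
        exact h (by simpa using (List.mem_filter.1 hmem).2)
  have hperm : ((FP.map (fun p => p.2)).flatten).Perm LETTERS := List.perm_iff_count.2 hcount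
  -- the concatenation is pairwise decreasing under the composite key
  have hfstnd : FP.Pairwise (fun p q => get_item_zero p ≠ get_item_zero q) := by
    have h1 : (FP.map get_item_zero).Perm (items2.map get_item_zero) :=
      (PySem.List.sorted_perm items2 get_item_zero true).map _
    have h2 : items2.map get_item_zero = K := by
      rw [hitems2]; simp [List.map_map, get_item_zero, Function.comp_def]
    have h3 : (FP.map get_item_zero).Nodup := by
      rw [h1.nodup_iff, h2]; exact PySem.Set.nodup_ofList _
    rw [List.Nodup, List.pairwise_map] at h3
    exact h3
  have hlt : FP.Pairwise (fun p q => q.1 < p.1) := by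
    have hle := PySem.List.sorted_pairwise_rev items2 get_item_zero
    rw [← hFP] at hle
    exact (hle.and hfstnd).imp (fun h => lt_of_le_of_ne h.1 (fun e => h.2 e.symm))
  have hpair : ((FP.map (fun p => p.2)).flatten).Pairwise (fun a b => bkey ups b ≤ bkey ups a) := by
    rw [List.pairwise_flatten]
    refine ⟨?_, ?_⟩
    · intro l hl
      obtain ⟨p, hp, rfl⟩ := List.mem_map.1 hl
      obtain ⟨f, rfl⟩ := hFPmem p hp
      refine List.Pairwise.imp_of_mem ?_
        (PySem.List.sorted_pairwise_rev (LETTERS.filter (fun L => ck L == f))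
          (fun c => PySem.Chars.find ETAOIN [c]))
      intro a b ha hb hfind
      obtain ⟨haL, haf⟩ := hbmem f a ha
      obtain ⟨hbL, hbf⟩ := hbmem f b hb
      have hca := hck a haL
      have hcb := hck b hbL
      unfold bkey
      omega
    · rw [List.pairwise_map]
      refine List.Pairwise.imp_of_mem ?_ hlt
      intro p q hp hq hpq x hx y hy
      obtain ⟨f, rfl⟩ := hFPmem p hp
      obtain ⟨g, rfl⟩ := hFPmem q hq
      obtain ⟨hxL, hxf⟩ := hbmem f x hx
      obtain ⟨hyL, hyf⟩ := hbmem g y hy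
      have h1 := pv_find_bounds x hxL
      have h2 := pv_find_bounds y hyL
      have hcx := hck x hxL
      have hcy := hck y hyL
      simp only at hpq
      unfold bkey
      omega
  -- stable-sort uniqueness: a pairwise-decreasing rearrangement with an injective key is THE sort
  refine List.Perm.eq_of_pairwise ?_ hpair (PySem.List.sorted_pairwise_rev LETTERS (bkey ups)) ?_
  · intro a b ha hb h1 h2
    exact pv_bkey_anti ups a (hperm.subset ha) b
      ((PySem.List.sorted_perm LETTERS (bkey ups) true).subset hb) h1 h2
  · exact hperm.trans (PySem.List.sorted_perm LETTERS (bkey ups) true).symm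

-- A's whole get_freq_order pipeline is the single composite-key sort
theorem pv_freq_order_eq (m : String) :
    get_freq_order m = PySem.List.sorted LETTERS (bkey ((PySem.Str.upper m).toList)) true := by
  unfold get_freq_order
  dsimp only
  rw [pv_bucket_fold]
  set lc := get_letter_count m with hlc
  set D := LETTERS.foldl (fun d L => d.modify (lc.getD L 0) [] (fun x => x ++ [L])) PySem.Dict.empty with hD
  have hDpairs : D = (LETTERS.map (fun L => (lc.getD L 0, L))).foldl
      (fun d p => d.modify p.1 [] (fun x => x ++ [p.2])) PySem.Dict.empty := by
    rw [List.foldl_map]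
  have hkeys : D.keys = PySem.Set.ofList (LETTERS.map (fun L => lc.getD L 0)) := by
    have := PySem.Dict.keys_foldl_modify_key LETTERS (fun L => lc.getD L 0) []
      (fun _ L => (fun x => x ++ [L])) PySem.Dict.empty
    simpa [PySem.Dict.keys_empty, PySem.Set.update_nil_left] using this
  have hnd : D.keys.Nodup :=
    PySem.Dict.nodup_keys_foldl_modify_key LETTERS (fun L => lc.getD L 0) []
      (fun _ L => (fun x => x ++ [L])) PySem.Dict.empty PySem.Dict.nodup_keys_empty
  have hgetD : ∀ c, D.getD c [] = LETTERS.filter (fun L => (lc.getD L 0) == c) := by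
    intro c
    rw [hDpairs, PySem.Dict.getD_foldl_modify_append, PySem.Dict.getD_empty, pv_fiber_map]
    simp
  have hitems : D.items = (PySem.Set.ofList (LETTERS.map (fun L => lc.getD L 0))).map
      (fun f => (f, LETTERS.filter (fun L => (lc.getD L 0) == f))) := by
    rw [PySem.Dict.items_eq_map_keys D hnd [], hkeys]
    exact List.map_congr_left (fun f _ => by rw [hgetD f])
  rw [hitems, List.map_map]
  have := pv_concat_eq ((PySem.Str.upper m).toList) (fun L => lc.getD L 0) (pv_lc_getD m)
  simpa [Function.comp_def] using this

-- ===== VERDICT (by name: the statement is the Claim_ definition above) =====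
theorem eng_freq_match_score_spec : Claim_equal_eng_freq_match_score := by
  intro m _
  unfold Spec_eng_freq_match_score eng_freq_match_score eng_freq_match_score_alt
  dsimp only
  rw [pv_freq_order_eq m]
  rw [PySem.List.foldl_if_add_one, PySem.List.foldl_if_add_one]
  ring
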